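-- pv_equiv track=rewrite | github.com/Igoreshaway/python-tasks | get_unique_keys.py | sort_count_ingredients
-- ===== SOURCE A (Python) =====
-- def dictionary_unpacking_to_a_list(dict_books: list[dict]) -> list:
--     list_with_lists_ingredients = []
--     for li in dict_books:
--         list_with_lists_ingredients += li.values()
--
--     list_with_ingredients = [x for l in list_with_lists_ingredients for x in l]
--     return list_with_ingredients
--
-- def unique_ingredients(dict_books: list[dict]) -> list:
--     list_ingredients = dictionary_unpacking_to_a_list(dict_books)
--     list_unique_ingredients = []
--
--     for i in list_ingredients:
--         if i not in list_unique_ingredients: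
--             list_unique_ingredients.append(i)
--
--     return list_unique_ingredients
--
-- def counting_the_ingredients(dict_books: list[dict]) -> list[int] and list[str]:
--     list_ingredients = dictionary_unpacking_to_a_list(dict_books)
--     list_unique_ingredients = unique_ingredients(dict_books)
--     count_ingredient = []
--     for i in list_unique_ingredients:
--         count_ingredient.append(list_ingredients.count(i))
--
--     return count_ingredient, list_unique_ingredients, list_ingredients
--
-- def sort_count_ingredients(dict_books: list[dict]) -> list:
--     count_ingredients, list_unique_ingredients, list_ingredients = counting_the_ingredients(dict_books)
--     sort_list_count_ingredients = sorted(count_ingredients, reverse=True)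
--     sort_list_ingredients = []
--     for i in sort_list_count_ingredients:
--         for j in list_ingredients:
--             if i == list_ingredients.count(j) and j not in sort_list_ingredients:
--                 sort_list_ingredients.append(j)
--
--     return sort_list_ingredients
-- ===== SOURCE B (Python) =====
-- def sort_count_ingredients(dict_books):
--     ingredients = [x for d in dict_books for v in d.values() for x in v]
--     counts = {}
--     for x in ingredients:
--         counts[x] = counts.get(x, 0) + 1
--     buckets = {}
--     for x, c in counts.items():
--         buckets.setdefault(c, []).append(x)
--     result = []
--     for c in range(max(counts.values(), default=0), 0, -1):
--         result += buckets.get(c, [])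
--     return result
-- ===== Notes on version B (the rewrite author's own statement) =====
-- stated objective: faster
-- what changed: Replaced A's reverse comparison sort of the count list plus a doubly nested rescan (list.count and membership test inside two loops) by a single-pass hash counter, counting-sort-style buckets keyed by frequency filled in first-appearance order, and one walk from the maximum count down to 1.
import Mathlib
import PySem

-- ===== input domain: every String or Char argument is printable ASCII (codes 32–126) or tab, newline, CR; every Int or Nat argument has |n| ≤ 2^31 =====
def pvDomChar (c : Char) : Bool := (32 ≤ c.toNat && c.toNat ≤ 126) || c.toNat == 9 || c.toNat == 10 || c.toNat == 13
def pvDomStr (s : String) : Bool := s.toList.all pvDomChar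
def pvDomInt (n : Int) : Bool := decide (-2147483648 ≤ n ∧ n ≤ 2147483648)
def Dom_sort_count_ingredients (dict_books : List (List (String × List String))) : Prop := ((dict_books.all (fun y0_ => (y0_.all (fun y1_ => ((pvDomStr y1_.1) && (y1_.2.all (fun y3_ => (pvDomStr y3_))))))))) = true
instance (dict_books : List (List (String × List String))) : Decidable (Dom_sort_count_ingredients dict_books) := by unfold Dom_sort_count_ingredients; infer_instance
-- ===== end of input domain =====

-- B replaces A's comparison sort plus nested .count rescans by a one-pass counter and
-- counting-sort-style buckets walked from the maximum count down.

-- ===== PORT A =====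
def dictionary_unpacking_to_a_list (dict_books : List (List (String × List String))) : List String :=
  let list_with_lists_ingredients :=
    dict_books.foldl (fun acc li => acc ++ li.map Prod.snd) []
  list_with_lists_ingredients.flatMap (fun l => l)

def unique_ingredients (dict_books : List (List (String × List String))) : List String :=
  let list_ingredients := dictionary_unpacking_to_a_list dict_books
  list_ingredients.foldl (fun acc i => if acc.contains i then acc else acc ++ [i]) []

def counting_the_ingredients (dict_books : List (List (String × List String))) :
    List Int × List String × List String :=
  let list_ingredients := dictionary_unpacking_to_a_list dict_books
  let list_unique_ingredients := unique_ingredients dict_books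
  let count_ingredient :=
    list_unique_ingredients.foldl
      (fun acc i => acc ++ [(PySem.List.count list_ingredients i : Int)]) []
  (count_ingredient, list_unique_ingredients, list_ingredients)

def sort_count_ingredients (dict_books : List (List (String × List String))) : List String :=
  match counting_the_ingredients dict_books with
  | (count_ingredients, _list_unique_ingredients, list_ingredients) =>
    let sort_list_count_ingredients := PySem.List.sorted count_ingredients (fun x => x) true
    sort_list_count_ingredients.foldl (fun acc i =>
      list_ingredients.foldl (fun acc j =>
        if (i == (PySem.List.count list_ingredients j : Int)) && !(acc.contains j)
        then acc ++ [j] else acc) acc) []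

-- ===== PORT B =====
def sort_count_ingredients_alt (dict_books : List (List (String × List String))) : List String :=
  let ingredients := dict_books.flatMap (fun d => (d.map Prod.snd).flatMap (fun v => v))
  let counts : PySem.Dict String Int :=
    ingredients.foldl (fun d x => d.insert x (d.getD x 0 + 1)) PySem.Dict.empty
  let buckets : PySem.Dict Int (List String) :=
    counts.items.foldl (fun d p => d.modify p.2 [] (fun l => l ++ [p.1])) PySem.Dict.empty
  let m : Int := match PySem.List.max? counts.values (fun x => x) with
    | some v => v
    | none => 0
  (PySem.List.pyRange m 0 (-1)).foldl (fun res c => res ++ buckets.getD c []) []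

-- ===== PRECONDITION & SPEC =====
def Spec_sort_count_ingredients (dict_books : List (List (String × List String))) (out : List String) : Prop := out = sort_count_ingredients_alt dict_books
instance (dict_books : List (List (String × List String))) (out : List String) : Decidable (Spec_sort_count_ingredients dict_books out) := by unfold Spec_sort_count_ingredients; infer_instance

-- ===== CLAIM (what is proved, stated in full; the proofs are below) =====
def Claim_equal_sort_count_ingredients : Prop := ∀ (dict_books : List (List (String × List String))), Dom_sort_count_ingredients dict_books → Spec_sort_count_ingredients dict_books (sort_count_ingredients dict_books)

-- ===== LEMMAS AND PROOFS =====

def pvFlat (dict_books : List (List (String × List String))) : List String :=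
  dict_books.flatMap (fun d => (d.map Prod.snd).flatMap (fun v => v))

lemma flat_eq (db : List (List (String × List String))) :
    dictionary_unpacking_to_a_list db = pvFlat db := by
  simp only [dictionary_unpacking_to_a_list, pvFlat, PySem.List.foldl_append_eq_flatMap]
  simp [List.flatMap, List.flatten_flatten, Function.comp_def]

lemma unique_eq (db : List (List (String × List String))) :
    unique_ingredients db = PySem.Set.ofList (dictionary_unpacking_to_a_list db) := rfl

lemma ofList_sublist {α : Type} [BEq α] [LawfulBEq α] (l : List α) :
    (PySem.Set.ofList l).Sublist l := by
  induction l with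
  | nil => simp [PySem.Set.ofList_nil]
  | cons x t ih =>
    rw [PySem.Set.ofList_cons]
    exact List.Sublist.cons₂ x ((List.filter_sublist).trans ih)

lemma flatMap_filter_of_empty {α β : Type} (l : List α) (p : α → Bool) (f : α → List β)
    (h : ∀ c ∈ l, p c = false → f c = []) :
    (l.filter p).flatMap f = l.flatMap f := by
  induction l with
  | nil => rfl
  | cons x t ih =>
    by_cases hp : p x
    · simp [List.filter_cons, hp, ih (fun c hc => h c (List.mem_cons_of_mem _ hc))]
    · simp only [Bool.not_eq_true] at hp
      simp [List.filter_cons, hp, h x (List.mem_cons_self) hp,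
        ih (fun c hc => h c (List.mem_cons_of_mem _ hc))]

lemma inner_loop (p : String → Bool) (l : List String) : ∀ acc : List String,
    l.foldl (fun a j => if p j && !(a.contains j) then a ++ [j] else a) acc
      = acc ++ (PySem.Set.ofList l).filter (fun j => p j && !(acc.contains j)) := by
  induction l with
  | nil => intro acc; simp [PySem.Set.ofList_nil]
  | cons x t ih =>
    intro acc
    rw [List.foldl_cons, PySem.Set.ofList_cons]
    by_cases hp : p x
    · by_cases hm : x ∈ acc
      · rw [if_neg (by simp [hp, hm])]
        rw [ih acc]
        congr 1
        simp only [List.filter_cons, PySem.Set.discard, List.filter_filter]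
        rw [if_neg (by simp [hp, hm])]
        apply List.filter_congr
        intro j hj
        by_cases hjx : j = x
        · simp [hjx, hm]
        · simp [hjx]
      · rw [if_pos (by simp [hp, hm])]
        rw [ih (acc ++ [x])]
        simp only [List.filter_cons, PySem.Set.discard, List.filter_filter]
        rw [if_pos (by simp [hp, hm])]
        rw [List.append_assoc, List.singleton_append]
        congr 2
        apply List.filter_congr
        intro j hj
        by_cases hjx : j = x
        · simp [hjx]
        · simp [hjx, Ne.symm hjx]
    · rw [if_neg (by simp [hp])]
      rw [ih acc]
      congr 1
      simp only [List.filter_cons, PySem.Set.discard, List.filter_filter]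
      rw [if_neg (by simp [hp])]
      apply List.filter_congr
      intro j hj
      by_cases hjx : j = x
      · simp [hjx, hp]
      · simp [hjx]

def pvCnt (L : List String) (j : String) : Int := (L.count j : Int)
def pvBucket (L : List String) (c : Int) : List String :=
  (PySem.Set.ofList L).filter (fun j => c == pvCnt L j)

lemma outer_loop (L : List String) : ∀ (S : List Int) (P : List Int) (acc : List String),
    (∀ j : String, acc.contains j
        = ((PySem.Set.ofList L).contains j && P.contains (pvCnt L j))) →
    S.foldl (fun acc i => acc ++ (PySem.Set.ofList L).filter
        (fun j => (i == pvCnt L j) && !(acc.contains j))) acc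
      = acc ++ ((PySem.Set.ofList S).filter (fun i => !(P.contains i))).flatMap (pvBucket L) := by
  intro S
  induction S with
  | nil => intro P acc hacc; simp [PySem.Set.ofList_nil]
  | cons i S' ih =>
    intro P acc hacc
    rw [List.foldl_cons, PySem.Set.ofList_cons]
    by_cases hP : i ∈ P
    · have hstep : (PySem.Set.ofList L).filter
          (fun j => (i == pvCnt L j) && !(acc.contains j)) = [] := by
        rw [List.filter_eq_nil_iff]
        intro j hj
        by_cases hc : i = pvCnt L j
        · have h1 : acc.contains j = true := by
            rw [hacc j, ← hc]
            simp [(PySem.Set.mem_ofList L j).mp hj, hP]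
          simp [List.contains_iff_mem.mp h1]
        · simp [hc]
      rw [hstep, List.append_nil, ih P acc hacc]
      congr 1
      simp only [List.filter_cons, PySem.Set.discard, List.filter_filter]
      rw [if_neg (by simp [hP])]
      congr 1
      apply List.filter_congr
      intro c hc
      by_cases hci : c = i
      · simp [hci, hP]
      · simp [hci]
    · have hstep : (PySem.Set.ofList L).filter
          (fun j => (i == pvCnt L j) && !(acc.contains j)) = pvBucket L i := by
        unfold pvBucket
        apply List.filter_congr
        intro j hj
        by_cases hc : i = pvCnt L j
        · have h1 : acc.contains j = false := by
            rw [hacc j, ← hc]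
            simp [hP]
          have h2 : j ∉ acc := by simpa using h1
          simp [h2]
        · simp [hc]
      rw [hstep]
      have hacc' : ∀ j : String, ((acc ++ pvBucket L i).contains j)
          = ((PySem.Set.ofList L).contains j && (P ++ [i]).contains (pvCnt L j)) := by
        intro j
        rw [Bool.eq_iff_iff]
        have h := Bool.eq_iff_iff.mp (hacc j)
        simp only [List.contains_iff_mem, List.mem_append, pvBucket, List.mem_filter,
          beq_iff_eq, List.mem_singleton, Bool.and_eq_true, PySem.Set.mem_ofList] at h ⊢
        rw [h]
        simp only [PySem.Set.contains_iff, PySem.Set.mem_ofList]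
        constructor
        · rintro (⟨hU, hPm⟩ | ⟨hU, hci⟩)
          · exact ⟨hU, Or.inl hPm⟩
          · exact ⟨hU, Or.inr hci.symm⟩
        · rintro ⟨hU, hPm | hci⟩
          · exact Or.inl ⟨hU, hPm⟩
          · exact Or.inr ⟨hU, hci.symm⟩
      rw [ih (P ++ [i]) (acc ++ pvBucket L i) hacc']
      rw [List.append_assoc]
      congr 1
      simp only [List.filter_cons, PySem.Set.discard, List.filter_filter]
      rw [if_pos (by simp [hP])]
      rw [List.flatMap_cons]
      congr 1
      congr 1
      apply List.filter_congr
      intro c hc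
      by_cases hci : c = i
      · simp [hci, hP]
      · simp [hci]

def pvM (L : List String) : Int :=
  match PySem.List.max? ((PySem.Set.ofList L).map (pvCnt L)) (fun x => x) with
  | some v => v
  | none => 0

lemma mem_counts_bounds (L : List String) (c : Int)
    (hc : c ∈ (PySem.Set.ofList L).map (pvCnt L)) : 0 < c ∧ c ≤ pvM L := by
  obtain ⟨k, hk, rfl⟩ := List.mem_map.mp hc
  constructor
  · have hkL : k ∈ L := (PySem.Set.mem_ofList L k).mp hk
    have : 0 < L.count k := List.count_pos_iff.mpr hkL
    unfold pvCnt; exact_mod_cast this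
  · unfold pvM
    cases hmax : PySem.List.max? ((PySem.Set.ofList L).map (pvCnt L)) (fun x => x) with
    | none =>
      rw [PySem.List.max?_eq_none_iff] at hmax
      rw [hmax] at hc
      simp at hc
    | some v =>
      exact PySem.List.max?_isMax hmax _ hc

lemma distinct_counts_eq (L : List String) :
    PySem.Set.ofList (PySem.List.sorted ((PySem.Set.ofList L).map (pvCnt L)) (fun x => x) true)
      = (PySem.List.pyRange (pvM L) 0 (-1)).filter
          (fun c => ((PySem.Set.ofList L).map (pvCnt L)).contains c) := by
  have hpwL : (PySem.Set.ofList (PySem.List.sorted ((PySem.Set.ofList L).map (pvCnt L)) (fun x => x) true)).Pairwise (· > ·) := by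
    have h1 : (PySem.List.sorted ((PySem.Set.ofList L).map (pvCnt L)) (fun x => x) true).Pairwise (fun a b : Int => b ≤ a) :=
      PySem.List.sorted_pairwise_rev _ _
    have h2 := List.Pairwise.sublist (ofList_sublist (PySem.List.sorted ((PySem.Set.ofList L).map (pvCnt L)) (fun x => x) true)) h1
    have h3 : (PySem.Set.ofList (PySem.List.sorted ((PySem.Set.ofList L).map (pvCnt L)) (fun x => x) true)).Pairwise (· ≠ ·) :=
      PySem.Set.nodup_ofList _
    exact (h2.and h3).imp (fun {a b} h => lt_of_le_of_ne h.1 (Ne.symm h.2))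
  have hpwR : ((PySem.List.pyRange (pvM L) 0 (-1)).filter
      (fun c => ((PySem.Set.ofList L).map (pvCnt L)).contains c)).Pairwise (· > ·) := by
    apply List.Pairwise.filter
    rw [PySem.List.pyRange_neg_one_eq_reverse]
    rw [List.pairwise_reverse]
    exact (PySem.List.pairwise_lt_pyRange_one _ _).imp (fun {a b} h => h)
  apply List.Perm.eq_of_pairwise
      (fun a b _ _ hab hba => absurd hba (not_lt_of_gt hab)) hpwL hpwR
  rw [List.perm_ext_iff_of_nodup (hpwL.imp (fun {a b} h => ne_of_gt h)) (hpwR.imp (fun {a b} h => ne_of_gt h))]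
  intro c
  rw [PySem.Set.mem_ofList, PySem.List.mem_sorted, List.mem_filter,
    PySem.List.mem_pyRange_neg_one]
  constructor
  · intro hc
    obtain ⟨h1, h2⟩ := mem_counts_bounds L c hc
    exact ⟨⟨h1, h2⟩, List.contains_iff_mem.mpr hc⟩
  · rintro ⟨-, h⟩
    exact List.contains_iff_mem.mp h

lemma A_eq (db : List (List (String × List String))) :
    sort_count_ingredients db
      = (PySem.List.pyRange (pvM (pvFlat db)) 0 (-1)).flatMap (pvBucket (pvFlat db)) := by
  unfold sort_count_ingredients counting_the_ingredients
  simp only [flat_eq, unique_eq, flat_eq]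
  set L := pvFlat db with hL
  have hcounts : (PySem.Set.ofList L).foldl
      (fun acc i => acc ++ [(PySem.List.count L i : Int)]) [] = (PySem.Set.ofList L).map (pvCnt L) := by
    rw [PySem.List.foldl_append_singleton_eq_map]
    rfl
  rw [hcounts]
  have hinner : (fun (acc : List String) (i : Int) =>
      L.foldl (fun acc j =>
        if (i == (PySem.List.count L j : Int)) && !(acc.contains j)
        then acc ++ [j] else acc) acc)
      = (fun acc i => acc ++ (PySem.Set.ofList L).filter
          (fun j => (i == pvCnt L j) && !(acc.contains j))) := by
    funext acc i
    exact inner_loop (fun j => i == pvCnt L j) L acc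
  rw [hinner]
  rw [outer_loop L _ [] [] (by intro j; simp)]
  have hfilt : ∀ (X : List Int), X.filter (fun i => !(List.contains ([]:List Int) i)) = X := by
    intro X; simp
  rw [hfilt, List.nil_append, distinct_counts_eq]
  apply flatMap_filter_of_empty
  intro c _ hfalse
  unfold pvBucket
  rw [List.filter_eq_nil_iff]
  intro j hj hcj
  have : pvCnt L j ∈ (PySem.Set.ofList L).map (pvCnt L) :=
    List.mem_map.mpr ⟨j, hj, rfl⟩
  rw [(beq_iff_eq).mp hcj] at hfalse
  rw [List.contains_iff_mem.mpr this] at hfalse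
  simp at hfalse

lemma values_counter_eq (L : List String) :
    (PySem.Dict.counter L).values = (PySem.Set.ofList L).map (pvCnt L) := by
  show ((PySem.Dict.counter L).items.map (fun p => p.2)) = _
  rw [PySem.Dict.items_counter]
  simp [pvCnt, List.map_map, Function.comp_def, List.count_eq_countP]

lemma bucket_getD_eq (L : List String) (c : Int) :
    ((PySem.Dict.counter L).items.foldl
        (fun d p => d.modify p.2 [] (fun l => l ++ [p.1])) PySem.Dict.empty).getD c []
      = pvBucket L c := by
  have hswap : (PySem.Dict.counter L).items.foldl
      (fun d p => d.modify p.2 [] (fun l => l ++ [p.1])) PySem.Dict.empty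
      = ((PySem.Dict.counter L).items.map Prod.swap).foldl
          (fun d p => d.modify p.1 [] (fun l => l ++ [p.2])) PySem.Dict.empty := by
    rw [List.foldl_map]
    simp [Prod.swap]
  rw [hswap, PySem.Dict.getD_foldl_modify_append, PySem.Dict.items_counter]
  simp only [PySem.Dict.getD_empty, List.nil_append, List.map_map, List.filter_map,
    Function.comp_def, Prod.swap_prod_mk]
  unfold pvBucket
  have hid : ∀ (l : List String), l.map (fun x => x) = l := by intro l; simp
  rw [hid]
  apply List.filter_congr
  intro j hj
  show (((List.count j L : Int)) == c) = (c == pvCnt L j)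
  rw [Bool.eq_iff_iff]
  simp only [beq_iff_eq, pvCnt]
  exact eq_comm

lemma alt_eq (db : List (List (String × List String))) :
    sort_count_ingredients_alt db
      = (PySem.List.pyRange (pvM (pvFlat db)) 0 (-1)).flatMap (pvBucket (pvFlat db)) := by
  unfold sort_count_ingredients_alt
  simp only [PySem.Dict.foldl_insert_getD_add_one_eq_counter]
  rw [PySem.List.foldl_append_eq_flatMap, List.nil_append]
  rw [values_counter_eq]
  apply List.flatMap_congr
  intro c _
  exact bucket_getD_eq (pvFlat db) c

-- ===== VERDICT (by name: the statement is the Claim_ definition above) =====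
theorem sort_count_ingredients_spec : Claim_equal_sort_count_ingredients := by
  intro db _
  unfold Spec_sort_count_ingredients
  rw [A_eq, alt_eq]
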